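-- pv_equiv track=rewrite | github.com/OTheVyzx/TraduzAi | pipeline/translator/translate.py | _pick_ollama_model
-- ===== SOURCE A (Python) =====
-- def _pick_ollama_model(models: list[str], preferred: str) -> str:
--     preferred = (preferred or "").strip()
--     if preferred:
--         for model in models:
--             if preferred in model:
--                 return model
--
--     for candidate in ("traduzai-translator", "mangatl-translator"):
--         for model in models:
--             if candidate in model:
--                 return model
--
--     return models[0] if models else ""
-- ===== SOURCE B (Python) =====
-- def _pick_ollama_model(models: list[str], preferred: str) -> str:
--     pref = (preferred or "").strip()
--     best = None
--     best_rank = None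
--     for model in models:
--         if pref and pref in model:
--             rank = 0
--         elif "traduzai-translator" in model:
--             rank = 1
--         elif "mangatl-translator" in model:
--             rank = 2
--         else:
--             continue
--         if best_rank is None or rank < best_rank:
--             best, best_rank = model, rank
--     if best is not None:
--         return best
--     return models[0] if models else ""
-- ===== Notes on version B (the rewrite author's own statement) =====
-- stated objective: alternative
-- what changed: Replaces A's three sequential scans (preferred, then each hardcoded candidate) by a single pass that ranks each model (0=preferred, 1/2=fallback names) and keeps the earliest model of the lowest rank seen.
import Mathlib
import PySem

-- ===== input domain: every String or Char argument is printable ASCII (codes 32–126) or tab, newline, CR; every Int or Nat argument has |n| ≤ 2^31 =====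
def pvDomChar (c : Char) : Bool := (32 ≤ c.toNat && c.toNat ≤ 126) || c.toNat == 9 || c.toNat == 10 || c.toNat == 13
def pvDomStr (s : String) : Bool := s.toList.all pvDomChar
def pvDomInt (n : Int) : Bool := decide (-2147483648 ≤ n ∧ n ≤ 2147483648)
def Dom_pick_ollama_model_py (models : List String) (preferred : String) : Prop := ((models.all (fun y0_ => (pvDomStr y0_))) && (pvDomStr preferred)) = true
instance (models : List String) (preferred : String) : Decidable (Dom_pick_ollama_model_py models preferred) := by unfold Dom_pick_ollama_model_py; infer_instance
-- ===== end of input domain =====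

-- B replaces A's three sequential scans over the model list by a single ranked pass
-- (0 = preferred, 1/2 = fallback names; earliest model of the lowest rank wins): alternative decomposition.


-- ===== PORT A =====
-- first loop / inner candidate loop: return the first model containing `sub`
def aScan (sub : String) : List String → Option String
  | [] => none
  | m :: ms => if PySem.Str.isIn sub m then some m else aScan sub ms

-- outer loop over the tuple of candidate names
def aCand (models : List String) : List String → Option String
  | [] => none
  | c :: cs =>
    match aScan c models with
    | some m => some m
    | none => aCand models cs

def pick_ollama_model_py (models : List String) (preferred : String) : String :=
  let pref := PySem.Str.strip preferred   -- (preferred or "").strip(): `or ""` is the identity on strings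
  match (if pref ≠ "" then aScan pref models else none) with
  | some m => m
  | none =>
    match aCand models ["traduzai-translator", "mangatl-translator"] with
    | some m => m
    | none => match models with | [] => "" | m :: _ => m

-- ===== PORT B =====
-- rank of a model: 0 = contains non-empty preferred, 1/2 = fallback names, none = skipped
def bRank (pref m : String) : Option Nat :=
  if pref ≠ "" ∧ PySem.Str.isIn pref m then some 0
  else if PySem.Str.isIn "traduzai-translator" m then some 1
  else if PySem.Str.isIn "mangatl-translator" m then some 2
  else none

-- single pass: keep the earliest model of the strictly lowest rank seen so far
def bScan (pref : String) : List String → Option (String × Nat) → Option (String × Nat)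
  | [], acc => acc
  | m :: ms, acc =>
    bScan pref ms
      (match bRank pref m with
       | none => acc
       | some r =>
         match acc with
         | none => some (m, r)
         | some (bm, br) => if r < br then some (m, r) else some (bm, br))

def pick_ollama_model_py_alt (models : List String) (preferred : String) : String :=
  let pref := PySem.Str.strip preferred
  match bScan pref models none with
  | some (m, _) => m
  | none => match models with | [] => "" | m :: _ => m

-- ===== PRECONDITION & SPEC =====
def Spec_pick_ollama_model_py (models : List String) (preferred : String) (out : String) : Prop := out = pick_ollama_model_py_alt models preferred
instance (models : List String) (preferred : String) (out : String) : Decidable (Spec_pick_ollama_model_py models preferred out) := by unfold Spec_pick_ollama_model_py; infer_instance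

-- ===== CLAIM (what is proved, stated in full; the proofs are below) =====
def Claim_equal_pick_ollama_model_py : Prop := ∀ (models : List String) (preferred : String), Dom_pick_ollama_model_py models preferred → Spec_pick_ollama_model_py models preferred (pick_ollama_model_py models preferred)

-- ===== LEMMAS AND PROOFS =====

-- one unfolding step of bScan
theorem bScan_cons (pref h : String) (t : List String) (acc : Option (String × Nat)) :
    bScan pref (h :: t) acc =
      bScan pref t
        (match bRank pref h with
         | none => acc
         | some r =>
           match acc with
           | none => some (h, r)
           | some (bm, br) => if r < br then some (h, r) else some (bm, br)) := rfl

-- the three possible values of bRank, from the branch conditions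
theorem bRank_eq_zero {pref m : String} (hp : pref ≠ "") (h0 : PySem.Str.isIn pref m = true) :
    bRank pref m = some 0 := by
  unfold bRank; rw [if_pos ⟨hp, h0⟩]

theorem bRank_eq_one {pref m : String} (hp0 : ¬(pref ≠ "" ∧ PySem.Str.isIn pref m = true))
    (h1 : PySem.Str.isIn "traduzai-translator" m = true) :
    bRank pref m = some 1 := by
  unfold bRank; rw [if_neg hp0, if_pos h1]

theorem bRank_eq_two {pref m : String} (hp0 : ¬(pref ≠ "" ∧ PySem.Str.isIn pref m = true))
    (h1 : ¬ PySem.Str.isIn "traduzai-translator" m = true)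
    (h2 : PySem.Str.isIn "mangatl-translator" m = true) :
    bRank pref m = some 2 := by
  unfold bRank; rw [if_neg hp0, if_neg h1, if_pos h2]

theorem bRank_eq_none {pref m : String} (hp0 : ¬(pref ≠ "" ∧ PySem.Str.isIn pref m = true))
    (h1 : ¬ PySem.Str.isIn "traduzai-translator" m = true)
    (h2 : ¬ PySem.Str.isIn "mangatl-translator" m = true) :
    bRank pref m = none := by
  unfold bRank; rw [if_neg hp0, if_neg h1, if_neg h2]

-- the pref-scan skips a model that does not score rank 0
theorem aScan_pref_skip {pref h : String} (t : List String)
    (hp0 : ¬(pref ≠ "" ∧ PySem.Str.isIn pref h = true)) :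
    (if pref ≠ "" then aScan pref (h :: t) else none)
      = (if pref ≠ "" then aScan pref t else none) := by
  by_cases hp : pref ≠ ""
  · rw [if_pos hp, if_pos hp]
    simp only [aScan]
    rw [if_neg (fun hc => hp0 ⟨hp, hc⟩)]
  · rw [if_neg hp, if_neg hp]

-- an accumulator of rank 0 is never replaced
theorem bScan_rank0 (pref : String) (ms : List String) (m : String) :
    bScan pref ms (some (m, 0)) = some (m, 0) := by
  induction ms with
  | nil => rfl
  | cons h t ih =>
    rw [bScan_cons]
    cases hr : bRank pref h with
    | none => exact ih
    | some r => simpa using ih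

-- an accumulator of rank 1 is only replaced by the first rank-0 (preferred) hit
theorem bScan_rank1 (pref : String) (ms : List String) (m : String) :
    bScan pref ms (some (m, 1)) =
      match (if pref ≠ "" then aScan pref ms else none) with
      | some m' => some (m', 0)
      | none => some (m, 1) := by
  induction ms with
  | nil => by_cases hp : pref ≠ "" <;> simp [aScan, bScan, hp]
  | cons h t ih =>
    by_cases hp0 : pref ≠ "" ∧ PySem.Str.isIn pref h = true
    · rw [bScan_cons, bRank_eq_zero hp0.1 hp0.2]
      rw [if_pos hp0.1]
      unfold aScan
      rw [if_pos hp0.2]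
      simpa using bScan_rank0 pref t h
    · rw [bScan_cons, aScan_pref_skip t hp0]
      cases hr : bRank pref h with
      | none => exact ih
      | some r =>
        have hr0 : r ≠ 0 := by
          intro e; subst e
          unfold bRank at hr
          rw [if_neg hp0] at hr
          by_cases h1 : PySem.Str.isIn "traduzai-translator" h = true
          · rw [if_pos h1] at hr; exact absurd hr (by simp)
          · rw [if_neg h1] at hr
            by_cases h2 : PySem.Str.isIn "mangatl-translator" h = true
            · rw [if_pos h2] at hr; exact absurd hr (by simp)
            · rw [if_neg h2] at hr; exact absurd hr (by simp)
        have : ¬ r < 1 := by omega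
        simpa [this] using ih

-- an accumulator of rank 2 is replaced by the first rank-0 hit, else the first rank-1 hit
theorem bScan_rank2 (pref : String) (ms : List String) (m : String) :
    bScan pref ms (some (m, 2)) =
      match (if pref ≠ "" then aScan pref ms else none) with
      | some m' => some (m', 0)
      | none =>
        match aScan "traduzai-translator" ms with
        | some m' => some (m', 1)
        | none => some (m, 2) := by
  induction ms with
  | nil => by_cases hp : pref ≠ "" <;> simp [aScan, bScan, hp]
  | cons h t ih =>
    by_cases hp0 : pref ≠ "" ∧ PySem.Str.isIn pref h = true
    · rw [bScan_cons, bRank_eq_zero hp0.1 hp0.2]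
      rw [if_pos hp0.1]
      unfold aScan
      rw [if_pos hp0.2]
      simpa using bScan_rank0 pref t h
    · rw [bScan_cons, aScan_pref_skip t hp0]
      by_cases h1 : PySem.Str.isIn "traduzai-translator" h = true
      · rw [bRank_eq_one hp0 h1]
        have : bScan pref t (if 1 < 2 then some (h, 1) else some (m, 2))
            = bScan pref t (some (h, 1)) := by norm_num
        rw [this, bScan_rank1]
        conv_rhs => rw [show aScan "traduzai-translator" (h :: t)
          = some h from by simp only [aScan]; rw [if_pos h1]]
      · by_cases h2 : PySem.Str.isIn "mangatl-translator" h = true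
        · rw [bRank_eq_two hp0 h1 h2]
          have : bScan pref t (if 2 < 2 then some (h, 2) else some (m, 2))
              = bScan pref t (some (m, 2)) := by norm_num
          rw [this, ih]
          conv_rhs => rw [show aScan "traduzai-translator" (h :: t)
            = aScan "traduzai-translator" t from by simp only [aScan]; rw [if_neg h1]]
        · rw [bRank_eq_none hp0 h1 h2, ih]
          conv_rhs => rw [show aScan "traduzai-translator" (h :: t)
            = aScan "traduzai-translator" t from by simp only [aScan]; rw [if_neg h1]]

-- characterisation of the single pass from the empty accumulator by A's three scans
theorem bScan_none (pref : String) (ms : List String) :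
    bScan pref ms none =
      match (if pref ≠ "" then aScan pref ms else none) with
      | some m => some (m, 0)
      | none =>
        match aScan "traduzai-translator" ms with
        | some m => some (m, 1)
        | none =>
          match aScan "mangatl-translator" ms with
          | some m => some (m, 2)
          | none => none := by
  induction ms with
  | nil => by_cases hp : pref ≠ "" <;> simp [aScan, bScan, hp]
  | cons h t ih =>
    by_cases hp0 : pref ≠ "" ∧ PySem.Str.isIn pref h = true
    · rw [bScan_cons, bRank_eq_zero hp0.1 hp0.2]
      rw [if_pos hp0.1]
      unfold aScan
      rw [if_pos hp0.2]
      simpa using bScan_rank0 pref t h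
    · rw [bScan_cons, aScan_pref_skip t hp0]
      by_cases h1 : PySem.Str.isIn "traduzai-translator" h = true
      · rw [bRank_eq_one hp0 h1]
        simp only []
        rw [bScan_rank1]
        conv_rhs => rw [show aScan "traduzai-translator" (h :: t)
          = some h from by simp only [aScan]; rw [if_pos h1]]
      · have hT : aScan "traduzai-translator" (h :: t)
            = aScan "traduzai-translator" t := by simp only [aScan]; rw [if_neg h1]
        by_cases h2 : PySem.Str.isIn "mangatl-translator" h = true
        · rw [bRank_eq_two hp0 h1 h2]
          simp only []
          rw [bScan_rank2]
          conv_rhs => rw [hT, show aScan "mangatl-translator" (h :: t)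
            = some h from by simp only [aScan]; rw [if_pos h2]]
        · rw [bRank_eq_none hp0 h1 h2, ih]
          conv_rhs => rw [hT, show aScan "mangatl-translator" (h :: t)
            = aScan "mangatl-translator" t from by simp only [aScan]; rw [if_neg h2]]

-- ===== VERDICT (by name: the statement is the Claim_ definition above) =====
theorem pick_ollama_model_py_spec : Claim_equal_pick_ollama_model_py := by
  intro models preferred _
  unfold Spec_pick_ollama_model_py pick_ollama_model_py pick_ollama_model_py_alt
  dsimp only
  rw [bScan_none]
  cases h0 : (if PySem.Str.strip preferred ≠ "" then aScan (PySem.Str.strip preferred) models else none) with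
  | some m => rfl
  | none =>
    cases h1 : aScan "traduzai-translator" models with
    | some m => simp [aCand, h1]
    | none =>
      cases h2 : aScan "mangatl-translator" models with
      | some m => simp [aCand, h1, h2]
      | none => cases models <;> simp [aCand, h1, h2]
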